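-- pv_equiv track=rewrite | github.com/Agentic-Environmental-Engineering/GymVerse | gem/gem/envs/RLVE/new_nim_game_env.py | _remaining_is_basis
-- ===== SOURCE A (Python) =====
-- from typing import Any, Optional, SupportsFloat, Tuple, List
--
-- def _remaining_is_basis(A: List[int], removed_indices_1based: List[int]) -> bool:
--     """Check if all remaining heaps can be inserted into a xor-basis (i.e., no dependence)."""
--     if not A:
--         return True
--     max_bit = max(A).bit_length()
--     D = [0] * max_bit
--
--     removed_flags = [False] * len(A)
--     for idx in removed_indices_1based:
--         removed_flags[idx - 1] = True
--
--     def add(x: int) -> bool: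
--         for i in range(max_bit - 1, -1, -1):
--             if (x >> i) & 1:
--                 if D[i]:
--                     x ^= D[i]
--                 else:
--                     D[i] = x
--                     return True
--         return False
--
--     for i, Ai in enumerate(A):
--         if not removed_flags[i]:
--             if not add(Ai):
--                 return False
--     return True
-- ===== SOURCE B (Python) =====
-- def _remaining_is_basis(A, removed_indices_1based):
--     """Check if all remaining heaps can be inserted into a xor-basis (i.e., no dependence)."""
--     if not A:
--         return True
--     max_bit = max(A).bit_length()
--
--     removed_flags = [False] * len(A)
--     for idx in removed_indices_1based:
--         removed_flags[idx - 1] = True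
--
--     rows = [a for i, a in enumerate(A) if not removed_flags[i]]
--     used = [False] * len(rows)
--     rank = 0
--     for bit in range(max_bit - 1, -1, -1):
--         pivot = None
--         for j in range(len(rows)):
--             if not used[j] and (rows[j] >> bit) & 1:
--                 pivot = j
--                 break
--         if pivot is None:
--             continue
--         used[pivot] = True
--         rank += 1
--         for j in range(len(rows)):
--             if j != pivot and (rows[j] >> bit) & 1:
--                 rows[j] ^= rows[pivot]
--     return rank == len(rows)
-- ===== Notes on version B (the rewrite author's own statement) =====
-- stated objective: alternative
-- what changed: A inserts heaps one at a time into an incrementally built xor-basis with an early False return; B first builds the list of remaining heaps and then runs column-pivot GF(2) Gaussian elimination (bits outer, vectors inner), returning rank == number of remaining heaps.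
-- outside the precondition, e.g. on _remaining_is_basis([5, 3], [7]): A raises IndexError, B raises IndexError
import Mathlib
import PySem

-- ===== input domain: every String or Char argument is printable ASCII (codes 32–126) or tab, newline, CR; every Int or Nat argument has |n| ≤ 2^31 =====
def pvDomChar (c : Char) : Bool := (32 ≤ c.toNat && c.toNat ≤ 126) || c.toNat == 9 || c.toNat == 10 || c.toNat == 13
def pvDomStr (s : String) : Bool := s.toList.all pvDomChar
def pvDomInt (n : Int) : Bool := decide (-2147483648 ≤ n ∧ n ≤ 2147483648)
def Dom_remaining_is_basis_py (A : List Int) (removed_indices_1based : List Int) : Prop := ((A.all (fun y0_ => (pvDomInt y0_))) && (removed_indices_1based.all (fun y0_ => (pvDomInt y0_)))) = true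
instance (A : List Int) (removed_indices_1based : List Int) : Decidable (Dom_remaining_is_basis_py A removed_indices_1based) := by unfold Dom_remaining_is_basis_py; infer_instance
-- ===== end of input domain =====

-- B replaces A's insert-one-heap-at-a-time xor-basis construction (with its early False return)
-- by build-then-reduce GF(2) Gaussian elimination: bits outer, vectors inner, returning rank == #rows;
-- objective: alternative (a genuinely different traversal of the same data, similar cost).

-- ===== PORT A =====
-- removed_flags[idx - 1] = True : Python list assignment, negative index wraps,
-- out-of-range raises IndexError (excluded by Pre_); exact on Pre_.
def pvFlagsSet (flags : List Bool) (idx : Int) : List Bool :=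
  let j : Int := idx - 1
  let j' : Int := if j < 0 then j + flags.length else j
  if 0 ≤ j' ∧ j' < (flags.length : Int) then flags.set j'.toNat true else flags

def pvFlags (n : Nat) (removed : List Int) : List Bool :=
  removed.foldl pvFlagsSet (List.replicate n false)

-- the inner `add` loop of A: for i in range(max_bit-1,-1,-1); fuel = i; returns the
-- updated D on `return True`, none on `return False`.
-- `(x >> i) & 1` is tested with Int.testBit (exact: Python's two's-complement bit test);
-- `x ^= D[i]` is Int.xor (exact: Python's int xor).
def pvA_add (D : List Int) (x : Int) : Nat → Option (List Int)
  | 0 => none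
  | i + 1 =>
    if x.testBit i then
      if D.getD i 0 ≠ 0 then pvA_add D (Int.xor x (D.getD i 0)) i
      else some (D.set i x)
    else pvA_add D x i

-- the outer loop of A over enumerate(A), with early `return False`
def pvA_main (m : Nat) (flags : List Bool) : List (Int × Nat) → List Int → Bool
  | [], _ => true
  | (a, i) :: rest, D =>
    if flags.getD i false then pvA_main m flags rest D
    else
      match pvA_add D a m with
      | none => false
      | some D' => pvA_main m flags rest D'

def remaining_is_basis_py (A : List Int) (removed_indices_1based : List Int) : Bool :=
  if A = [] then true
  else
    -- max(A).bit_length(): Nat.size ∘ natAbs is Python's bit_length (abs-based)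
    let maxBit := ((PySem.List.max? A (fun y => y)).getD 0).natAbs.size
    let flags := pvFlags A.length removed_indices_1based
    pvA_main maxBit flags A.zipIdx (List.replicate maxBit 0)

-- ===== PORT B =====
-- rows = [a for i, a in enumerate(A) if not removed_flags[i]]
def pvB_rows (A : List Int) (flags : List Bool) : List Int :=
  A.zipIdx.filterMap (fun p => if flags.getD p.2 false then none else some p.1)

-- inner scan: first j with not used[j] and bit set (break)
def pvB_find (bit : Nat) : List (Int × Bool) → Nat → Option Nat
  | [], _ => none
  | (r, u) :: rest, j => if !u && r.testBit bit then some j else pvB_find bit rest (j + 1)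

-- rows[j] ^= rows[pivot] for every j ≠ pivot with the bit set (pivot row itself unchanged)
def pvB_elim (rows : List Int) (p : Nat) (pv : Int) (bit : Nat) : List Int :=
  rows.zipIdx.map (fun q => if q.2 ≠ p ∧ q.1.testBit bit then Int.xor q.1 pv else q.1)

-- for bit in range(max_bit-1,-1,-1): fuel = bit+1
def pvB_loop : Nat → List Int → List Bool → Nat → Nat
  | 0, _, _, rank => rank
  | bit + 1, rows, used, rank =>
    match pvB_find bit (rows.zip used) 0 with
    | none => pvB_loop bit rows used rank
    | some p => pvB_loop bit (pvB_elim rows p (rows.getD p 0) bit) (used.set p true) (rank + 1)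

def remaining_is_basis_py_alt (A : List Int) (removed_indices_1based : List Int) : Bool :=
  if A = [] then true
  else
    let maxBit := ((PySem.List.max? A (fun y => y)).getD 0).natAbs.size
    let flags := pvFlags A.length removed_indices_1based
    let rows := pvB_rows A flags
    pvB_loop maxBit rows (List.replicate rows.length false) 0 == rows.length

-- ===== PRECONDITION & SPEC =====
-- Pre_ excludes exactly the inputs where Python A raises IndexError: a nonempty A together with a
-- removed index idx whose 0-based position idx-1 falls outside Python's index range [-len(A), len(A)).
def Pre_remaining_is_basis_py (A : List Int) (removed_indices_1based : List Int) : Prop :=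
  A = [] ∨ ∀ idx ∈ removed_indices_1based,
    -(A.length : Int) ≤ idx - 1 ∧ idx - 1 < (A.length : Int)
instance (A : List Int) (removed_indices_1based : List Int) : Decidable (Pre_remaining_is_basis_py A removed_indices_1based) := by unfold Pre_remaining_is_basis_py; infer_instance

def pvWitness_remaining_is_basis_py : List Int × List Int := ([3, 5, 6, 2], [2])

def Spec_remaining_is_basis_py (A : List Int) (removed_indices_1based : List Int) (out : Bool) : Prop := out = remaining_is_basis_py_alt A removed_indices_1based
instance (A : List Int) (removed_indices_1based : List Int) (out : Bool) : Decidable (Spec_remaining_is_basis_py A removed_indices_1based out) := by unfold Spec_remaining_is_basis_py; infer_instance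

-- ===== CLAIM (what is proved, stated in full; the proofs are below) =====
def Claim_equal_remaining_is_basis_py : Prop := ∀ (A : List Int) (removed_indices_1based : List Int), Dom_remaining_is_basis_py A removed_indices_1based → Pre_remaining_is_basis_py A removed_indices_1based → Spec_remaining_is_basis_py A removed_indices_1based (remaining_is_basis_py A removed_indices_1based)

-- ===== LEMMAS AND PROOFS =====

-- ---- Int.xor is componentwise (sign, magnitude) xor: abelian-group laws ----
theorem ixor_comm (x y : Int) : Int.xor x y = Int.xor y x := by
  cases x <;> cases y <;> simp [Int.xor, Nat.xor_comm]

theorem ixor_zero (x : Int) : Int.xor x 0 = x := by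
  cases x <;> simp [Int.xor]

theorem zero_ixor (x : Int) : Int.xor 0 x = x := by
  rw [ixor_comm, ixor_zero]

theorem ixor_self (x : Int) : Int.xor x x = 0 := by
  cases x <;> simp [Int.xor]

theorem ixor_assoc (x y z : Int) : Int.xor (Int.xor x y) z = Int.xor x (Int.xor y z) := by
  cases x <;> cases y <;> cases z <;> simp [Int.xor, Nat.xor_assoc]

theorem ixor_left_comm (x y z : Int) : Int.xor x (Int.xor y z) = Int.xor y (Int.xor x z) := by
  rw [← ixor_assoc, ixor_comm x y, ixor_assoc]

theorem ixor_cancel_left (x y : Int) : Int.xor x (Int.xor x y) = y := by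
  rw [← ixor_assoc, ixor_self, zero_ixor]

theorem tb_zero (i : Nat) : Int.testBit 0 i = false := by
  simp [Int.testBit]

theorem tb_xor (x y : Int) (i : Nat) :
    (Int.xor x y).testBit i = xor (x.testBit i) (y.testBit i) :=
  Int.testBit_lxor x y i

theorem ite_true_eq {α : Type} (a b : α) : (if (true : Bool) = true then a else b) = a := by simp

theorem ite_false_eq {α : Type} (a b : α) : (if (false : Bool) = true then a else b) = b := by simp

-- ---- masked xor-sums over an index range ----
def rxor (f : Nat → Int) (c : Nat → Bool) (t : Nat) : Int :=
  (List.range t).foldl (fun a i => if c i then Int.xor a (f i) else a) 0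

def parf (g : Nat → Bool) (t : Nat) : Bool :=
  (List.range t).foldl (fun a j => xor a (g j)) false

theorem rxor_succ (f : Nat → Int) (c : Nat → Bool) (t : Nat) :
    rxor f c (t + 1) = if c t then Int.xor (rxor f c t) (f t) else rxor f c t := by
  simp only [rxor, List.range_succ, List.foldl_append, List.foldl_cons, List.foldl_nil]

theorem parf_succ (g : Nat → Bool) (t : Nat) :
    parf g (t + 1) = xor (parf g t) (g t) := by
  simp [parf, List.range_succ]

theorem rxor_congr {f f' : Nat → Int} {c c' : Nat → Bool} {t : Nat}
    (hf : ∀ j, j < t → f j = f' j) (hc : ∀ j, j < t → c j = c' j) :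
    rxor f c t = rxor f' c' t := by
  induction t with
  | zero => rfl
  | succ t ih =>
    rw [rxor_succ, rxor_succ, hc t (Nat.lt_succ_self t), hf t (Nat.lt_succ_self t),
      ih (fun j hj => hf j (Nat.lt_succ_of_lt hj)) (fun j hj => hc j (Nat.lt_succ_of_lt hj))]

theorem rxor_false_above {c : Nat → Bool} {t t' : Nat} (f : Nat → Int) (h : t ≤ t')
    (hc : ∀ j, t ≤ j → j < t' → c j = false) : rxor f c t' = rxor f c t := by
  induction t' with
  | zero => have h0 : t = 0 := by omega
            subst h0; rfl
  | succ t' ih =>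
    rcases Nat.eq_or_lt_of_le h with heq | hlt
    · rw [heq]
    · rw [rxor_succ, hc t' (by omega) (by omega)]
      simp only [Bool.false_eq_true, if_false]
      exact ih (by omega) (fun j h1 h2 => hc j h1 (by omega))

theorem parf_false {g : Nat → Bool} {t : Nat} (h : ∀ j, j < t → g j = false) :
    parf g t = false := by
  induction t with
  | zero => rfl
  | succ t ih =>
    rw [parf_succ, h t (Nat.lt_succ_self t), ih (fun j hj => h j (Nat.lt_succ_of_lt hj))]
    rfl

theorem parf_single {g : Nat → Bool} {t j0 : Nat} (hj : j0 < t) (hg : g j0 = true)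
    (ho : ∀ j, j < t → j ≠ j0 → g j = false) : parf g t = true := by
  induction t with
  | zero => omega
  | succ t ih =>
    rw [parf_succ]
    rcases Nat.lt_or_ge j0 t with hlt | hge
    · rw [ih hlt (fun j h1 h2 => ho j (Nat.lt_succ_of_lt h1) h2),
        ho t (Nat.lt_succ_self t) (by omega)]
      rfl
    · have : j0 = t := by omega
      subst this
      rw [hg, parf_false (fun j hj => ho j (Nat.lt_succ_of_lt hj) (by omega))]
      rfl

theorem tb_rxor (f : Nat → Int) (c : Nat → Bool) (t : Nat) (i : Nat) :
    (rxor f c t).testBit i = parf (fun j => c j && (f j).testBit i) t := by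
  induction t with
  | zero => simp [rxor, parf, tb_zero]
  | succ t ih =>
    rw [rxor_succ, parf_succ]
    by_cases h : c t <;> simp [h, tb_xor, ih]

theorem rxor_zero_fun {f : Nat → Int} {t : Nat} (h : ∀ j, j < t → f j = 0) (c : Nat → Bool) :
    rxor f c t = 0 := by
  induction t with
  | zero => rfl
  | succ t ih =>
    rw [rxor_succ, h t (Nat.lt_succ_self t), ih (fun j hj => h j (Nat.lt_succ_of_lt hj))]
    split <;> simp [ixor_zero]

theorem rxor_drop_zero {f : Nat → Int} {k : Nat} (hk : f k = 0) (c : Nat → Bool) (t : Nat) :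
    rxor f c t = rxor f (fun j => if j = k then false else c j) t := by
  induction t with
  | zero => rfl
  | succ t ih =>
    rw [rxor_succ, rxor_succ, ih]
    by_cases hjk : t = k
    · subst hjk; rw [hk]; simp [ixor_zero]
    · simp [hjk]

theorem rxor_update (f : Nat → Int) (k : Nat) (v : Int) (c : Nat → Bool) (t : Nat) (hk : k < t) :
    rxor (fun j => if j = k then v else f j) c t =
      Int.xor (rxor f (fun j => if j = k then false else c j) t) (if c k then v else 0) := by
  induction t with
  | zero => omega
  | succ t ih =>
    rcases Nat.lt_or_ge k t with hlt | hge
    · rw [rxor_succ, rxor_succ, ih hlt]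
      by_cases hct : c t
      · have htk : ¬ (t = k) := by omega
        simp only [htk, if_false, hct, if_true]
        rw [ixor_assoc, ixor_assoc, ixor_comm (if c k then v else 0) (f t)]
      · have htk : ¬ (t = k) := by omega
        simp [htk, hct]
    · have hkt : k = t := by omega
      subst hkt
      rw [rxor_succ, rxor_succ]
      have h1 : rxor (fun j => if j = k then v else f j) c k
          = rxor f (fun j => if j = k then false else c j) k := by
        apply rxor_congr
        · intro j hj; simp [Nat.ne_of_lt hj]
        · intro j hj; simp [Nat.ne_of_lt hj]
      simp only [if_pos rfl, h1]
      by_cases hck : c k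
      · simp [hck]
      · simp [hck, ixor_zero]

theorem rxor_mask_xor (f : Nat → Int) (c c' : Nat → Bool) (t : Nat) :
    rxor f (fun j => xor (c j) (c' j)) t = Int.xor (rxor f c t) (rxor f c' t) := by
  induction t with
  | zero => simp [rxor, ixor_zero]
  | succ t ih =>
    rw [rxor_succ, rxor_succ, rxor_succ, ih]
    by_cases h1 : c t <;> by_cases h2 : c' t <;>
      simp [h1, h2, ixor_assoc, ixor_left_comm, ixor_comm, ixor_self, ixor_zero, zero_ixor,
        ixor_cancel_left]

theorem rxor_map (f : Nat → Int) (g c : Nat → Bool) (v : Int) (t : Nat) :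
    rxor (fun j => if g j then Int.xor (f j) v else f j) c t =
      Int.xor (rxor f c t) (if parf (fun j => c j && g j) t then v else 0) := by
  induction t with
  | zero => simp [rxor, parf, ixor_zero]
  | succ t ih =>
    rw [rxor_succ, rxor_succ, parf_succ, ih]
    by_cases h1 : c t <;> by_cases h2 : g t <;>
      by_cases hp : parf (fun j => c j && g j) t <;>
      simp [h1, h2, hp, ixor_assoc, ixor_left_comm, ixor_comm, ixor_self, ixor_zero, zero_ixor,
        ixor_cancel_left]

theorem rxor_single (f : Nat → Int) (k t : Nat) (hk : k < t) :
    rxor f (fun j => decide (j = k)) t = f k := by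
  induction t with
  | zero => omega
  | succ t ih =>
    rw [rxor_succ]
    by_cases h : t = k
    · subst h
      rw [if_pos (by simp)]
      rw [rxor_false_above (t := 0) f (Nat.zero_le t) (fun j h1 h2 => by simp; omega)]
      rw [show rxor f (fun j => decide (j = t)) 0 = 0 from rfl, zero_ixor]
    · rw [if_neg (by simp [h])]
      exact ih (by omega)

-- ---- spans, dependence ----
def LowZero (m : Nat) (x : Int) : Prop := ∀ i, i < m → x.testBit i = false

def SpanL (m : Nat) (P : List Int) (x : Int) : Prop :=
  ∃ c : Nat → Bool, LowZero m (Int.xor x (rxor (fun j => P.getD j 0) c P.length))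

def SpanD (m : Nat) (D : List Int) (x : Int) : Prop :=
  ∃ c : Nat → Bool, LowZero m (Int.xor x (rxor (fun j => D.getD j 0) c m))

def Dep (m : Nat) (R : List Int) : Prop :=
  ∃ j, j < R.length ∧ SpanL m (R.take j) (R.getD j 0)

def DepM (m : Nat) (R : List Int) : Prop :=
  ∃ c : Nat → Bool, (∃ j, j < R.length ∧ c j = true) ∧
    LowZero m (rxor (fun j => R.getD j 0) c R.length)

def Basis (m : Nat) (D : List Int) : Prop :=
  D.length = m ∧ ∀ i, i < m → D.getD i 0 = 0 ∨
    ((D.getD i 0).testBit i = true ∧ ∀ j, i < j → j < m → (D.getD i 0).testBit j = false)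

def greedyAbs (m : Nat) (D : List Int) : List Int → Bool
  | [] => true
  | x :: r =>
    match pvA_add D x m with
    | none => false
    | some D' => greedyAbs m D' r

def IndepS (S : Int → Prop) : List Int → Prop
  | [] => True
  | x :: r => ¬ S x ∧ IndepS (fun z => S z ∨ S (Int.xor z x)) r


theorem getD_lt {α : Type} {l : List α} {k : Nat} (d : α) (h : k < l.length) :
    l.getD k d = l[k] := List.getD_eq_getElem l d h

theorem getD_set {l : List Int} {k : Nat} (y : Int) (j : Nat) (hk : k < l.length) :
    (l.set k y).getD j 0 = if j = k then y else l.getD j 0 := by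
  rcases Nat.lt_or_ge j l.length with hj | hj
  · by_cases hjk : j = k
    · subst hjk
      rw [getD_lt 0 (by simpa using hj), List.getElem_set_self, if_pos rfl]
    · rw [getD_lt 0 (by simpa using hj), getD_lt 0 hj, if_neg hjk,
        List.getElem_set_ne (by omega)]
  · have h1 : (l.set k y).getD j 0 = 0 := by
      rw [List.getD_eq_getElem?_getD, List.getElem?_eq_none (by simp; omega)]
      rfl
    have h2 : l.getD j 0 = 0 := by
      rw [List.getD_eq_getElem?_getD, List.getElem?_eq_none hj]
      rfl
    rw [h1, h2]
    have : ¬ (j = k) := by omega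
    simp [this]

theorem getD_set' {α : Type} {l : List α} {k : Nat} (y d : α) (j : Nat) (hk : k < l.length) :
    (l.set k y).getD j d = if j = k then y else l.getD j d := by
  rcases Nat.lt_or_ge j l.length with hj | hj
  · by_cases hjk : j = k
    · subst hjk
      rw [getD_lt d (by simpa using hj), List.getElem_set_self, if_pos rfl]
    · rw [getD_lt d (by simpa using hj), getD_lt d hj, if_neg hjk,
        List.getElem_set_ne (by omega)]
  · have h1 : (l.set k y).getD j d = d := by
      rw [List.getD_eq_getElem?_getD, List.getElem?_eq_none (by simp; omega)]
      rfl
    have h2 : l.getD j d = d := by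
      rw [List.getD_eq_getElem?_getD, List.getElem?_eq_none hj]
      rfl
    rw [h1, h2]
    have : ¬ (j = k) := by omega
    simp [this]

theorem getD_replicate' {α : Type} (n k : Nat) (a d : α) :
    (List.replicate n a).getD k d = if k < n then a else d := by
  rcases Nat.lt_or_ge k n with hk | hk
  · rw [getD_lt d (by simpa using hk), List.getElem_replicate, if_pos hk]
  · rw [List.getD_eq_getElem?_getD, List.getElem?_eq_none (by simpa using hk)]
    have : ¬ (k < n) := by omega
    simp [this]

theorem getD_zip {rows : List Int} {used : List Bool} {k : Nat}
    (hlen : used.length = rows.length) (hk : k < rows.length) :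
    (rows.zip used).getD k (0, false) = (rows.getD k 0, used.getD k false) := by
  have hkz : k < (rows.zip used).length := by rw [List.length_zip]; omega
  rw [getD_lt (0, false) hkz, List.getElem_zip, getD_lt 0 hk, getD_lt false (by omega)]

theorem getD_append_left {P Q : List Int} {j : Nat} (h : j < P.length) :
    (P ++ Q).getD j 0 = P.getD j 0 := by
  rw [getD_lt (l := P ++ Q) 0 (by simp; omega), getD_lt 0 h, List.getElem_append_left h]

theorem getD_concat_self (P : List Int) (x : Int) :
    (P ++ [x]).getD P.length 0 = x := by
  rw [getD_lt 0 (by simp)]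
  simp

theorem getD_take {R : List Int} {i j : Nat} (h : i < j) :
    (R.take j).getD i 0 = R.getD i 0 := by
  rcases Nat.lt_or_ge i R.length with hi | hi
  · rw [getD_lt (l := R.take j) 0 (by simp; omega), getD_lt 0 hi, List.getElem_take]
  · have h1 : (R.take j).getD i 0 = 0 := by
      rw [List.getD_eq_getElem?_getD, List.getElem?_eq_none (l := R.take j) (by simp; omega)]
      rfl
    have h2 : R.getD i 0 = 0 := by
      rw [List.getD_eq_getElem?_getD, List.getElem?_eq_none hi]
      rfl
    rw [h1, h2]

theorem spanD_xor_iff {m : Nat} {D : List Int} (u z : Int)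
    (hu : ∃ c0, u = rxor (fun j => D.getD j 0) c0 m) :
    SpanD m D (Int.xor z u) ↔ SpanD m D z := by
  obtain ⟨c0, hc0⟩ := hu
  constructor
  · rintro ⟨c, hc⟩
    refine ⟨fun j => xor (c0 j) (c j), ?_⟩
    rw [rxor_mask_xor, ← hc0]
    intro i hi
    have := hc i hi
    rw [← this]
    congr 1
    simp [ixor_assoc, ixor_left_comm, ixor_comm, ixor_cancel_left, ixor_self, ixor_zero, zero_ixor]
  · rintro ⟨c, hc⟩
    refine ⟨fun j => xor (c0 j) (c j), ?_⟩
    rw [rxor_mask_xor, ← hc0]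
    intro i hi
    have := hc i hi
    rw [← this]
    congr 1
    simp [ixor_assoc, ixor_left_comm, ixor_comm, ixor_cancel_left, ixor_self, ixor_zero, zero_ixor]

theorem indepS_congr {S T : Int → Prop} (h : ∀ z, S z ↔ T z) :
    ∀ R, IndepS S R ↔ IndepS T R := by
  intro R
  induction R generalizing S T with
  | nil => simp [IndepS]
  | cons x r ih =>
    simp only [IndepS]
    constructor
    · rintro ⟨h1, h2⟩
      exact ⟨fun hT => h1 ((h x).mpr hT), (ih (fun z => by rw [h z, h (Int.xor z x)])).mp h2⟩
    · rintro ⟨h1, h2⟩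
      exact ⟨fun hS => h1 ((h x).mp hS), (ih (fun z => by rw [h z, h (Int.xor z x)])).mpr h2⟩

-- any xor-combination of a Basis is low-zero or has a "profile": top set bit at a nonzero pivot
theorem basis_rxor_top {m : Nat} {D : List Int} (hB : Basis m D) (c : Nat → Bool) :
    ∀ t, t ≤ m →
      LowZero m (rxor (fun j => D.getD j 0) c t) ∨
      ∃ j, j < t ∧ D.getD j 0 ≠ 0 ∧ (rxor (fun j => D.getD j 0) c t).testBit j = true ∧
        ∀ j', j < j' → j' < m → (rxor (fun j => D.getD j 0) c t).testBit j' = false := by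
  intro t
  induction t with
  | zero =>
    intro _
    left
    intro i hi
    rw [show rxor (fun j => D.getD j 0) c 0 = 0 from rfl]
    exact tb_zero i
  | succ t ih =>
    intro ht
    have ht' : t ≤ m := by omega
    rw [rxor_succ]
    by_cases hct : c t = true
    · rw [hct, ite_true_eq]
      by_cases hDt : D.getD t 0 = 0
      · rw [hDt, ixor_zero]
        rcases ih ht' with h | ⟨j, hj, h1, h2, h3⟩
        · exact Or.inl h
        · exact Or.inr ⟨j, by omega, h1, h2, h3⟩
      · rcases (hB.2 t (by omega)) with h | ⟨htb, hhigh⟩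
        · exact absurd h hDt
        · right
          refine ⟨t, by omega, hDt, ?_, ?_⟩
          · rw [tb_xor]
            have hs : (rxor (fun j => D.getD j 0) c t).testBit t = false := by
              rcases ih ht' with h | ⟨j, hj, h1, h2, h3⟩
              · exact h t (by omega)
              · exact h3 t hj (by omega)
            rw [hs, htb]
            rfl
          · intro j' hj1 hj2
            rw [tb_xor]
            have hs : (rxor (fun j => D.getD j 0) c t).testBit j' = false := by
              rcases ih ht' with h | ⟨j, hj, h1, h2, h3⟩
              · exact h j' hj2
              · exact h3 j' (by omega) hj2
            rw [hs, hhigh j' hj1 hj2]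
            rfl
    · simp only [Bool.not_eq_true] at hct
      rw [hct, ite_false_eq]
      rcases ih ht' with h | ⟨j, hj, h1, h2, h3⟩
      · exact Or.inl h
      · exact Or.inr ⟨j, by omega, h1, h2, h3⟩

theorem not_span_profile {m : Nat} {D : List Int} (hB : Basis m D) {k : Nat} {y : Int}
    (hk : k < m) (h0 : D.getD k 0 = 0) (hbit : y.testBit k = true)
    (hhi : ∀ j, k < j → j < m → y.testBit j = false) : ¬ SpanD m D y := by
  rintro ⟨c, hc⟩
  rcases basis_rxor_top hB c m (le_refl m) with hlow | ⟨j, hj, hDj, hbit', hhigh'⟩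
  · have h1 := hc k hk
    rw [tb_xor, hbit, hlow k hk] at h1
    simp at h1
  · rcases Nat.lt_trichotomy j k with hlt | heq | hgt
    · have h1 := hc k hk
      rw [tb_xor, hbit, hhigh' k hlt hk] at h1
      simp at h1
    · exact hDj (heq ▸ h0)
    · have h1 := hc j hj
      rw [tb_xor, hhi j hgt hj, hbit'] at h1
      simp at h1

theorem add_spec {m : Nat} : ∀ (i : Nat), i ≤ m → ∀ (D : List Int) (x : Int), Basis m D →
    (∀ j, i ≤ j → j < m → x.testBit j = false) →
    (pvA_add D x i = none → SpanD m D x) ∧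
    (∀ D', pvA_add D x i = some D' →
      ∃ k y, k < i ∧ D.getD k 0 = 0 ∧ D' = D.set k y ∧
        y.testBit k = true ∧ (∀ j, k < j → j < m → y.testBit j = false) ∧
        ∃ c, y = Int.xor x (rxor (fun j => D.getD j 0) c i)) := by
  intro i
  induction i with
  | zero =>
    intro _ D x hB hhc
    constructor
    · intro _
      refine ⟨fun _ => false, ?_⟩
      intro i hi
      rw [rxor_false_above (t := 0) _ (Nat.zero_le m) (fun j h1 h2 => rfl),
        show rxor (fun j => D.getD j 0) (fun _ => false) 0 = 0 from rfl, ixor_zero]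
      exact hhc i (Nat.zero_le i) hi
    · intro D' h
      simp [pvA_add] at h
  | succ i ih =>
    intro hi1 D x hB hhc
    have hi : i ≤ m := by omega
    rw [pvA_add]
    by_cases hbit : x.testBit i
    · rw [if_pos hbit]
      by_cases hD : D.getD i 0 = 0
      · rw [if_neg (not_not_intro hD)]
        constructor
        · intro h
          simp at h
        · intro D' h
          have hD' : D.set i x = D' := Option.some.inj h
          refine ⟨i, x, by omega, hD, hD'.symm, hbit,
            (fun j hj1 hj2 => hhc j (by omega) hj2), fun _ => false, ?_⟩
          rw [rxor_false_above (t := 0) _ (Nat.zero_le (i + 1)) (fun j h1 h2 => rfl),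
            show rxor (fun j => D.getD j 0) (fun _ => false) 0 = 0 from rfl, ixor_zero]
      · rw [if_pos hD]
        rcases (hB.2 i (by omega)) with h | ⟨htb, hhigh⟩
        · exact absurd h hD
        · have hhc' : ∀ j, i ≤ j → j < m → (Int.xor x (D.getD i 0)).testBit j = false := by
            intro j hj1 hj2
            rw [tb_xor]
            rcases Nat.eq_or_lt_of_le hj1 with heq | hlt
            · cases heq
              rw [hbit, htb]
              rfl
            · rw [hhc j (by omega) hj2, hhigh j hlt hj2]
              rfl
          obtain ⟨hnone, hsome⟩ := ih hi D (Int.xor x (D.getD i 0)) hB hhc'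
          constructor
          · intro h
            have hs := hnone h
            have hiff := spanD_xor_iff (D := D) (m := m) (D.getD i 0) x
              ⟨fun j => decide (j = i), (rxor_single (fun j => D.getD j 0) i m (by omega)).symm⟩
            exact hiff.mp hs
          · intro D' h
            obtain ⟨k, y, hk, h0, hset, hbk, hhy, c, hy⟩ := hsome D' h
            refine ⟨k, y, by omega, h0, hset, hbk, hhy, fun j => if j = i then true else c j, ?_⟩
            rw [rxor_succ, if_pos (by simp), rxor_congr (f' := fun j => D.getD j 0) (c' := c)
              (fun j hj => rfl) (fun j hj => by simp [Nat.ne_of_lt hj])]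
            rw [hy]
            simp [ixor_assoc, ixor_left_comm, ixor_comm, ixor_cancel_left, ixor_self, ixor_zero, zero_ixor]
    · rw [if_neg hbit]
      simp only [Bool.not_eq_true] at hbit
      have hhc' : ∀ j, i ≤ j → j < m → x.testBit j = false := by
        intro j hj1 hj2
        rcases Nat.eq_or_lt_of_le hj1 with heq | hlt
        · exact heq ▸ hbit
        · exact hhc j (by omega) hj2
      obtain ⟨hnone, hsome⟩ := ih hi D x hB hhc'
      constructor
      · exact fun h => hnone h
      · intro D' h
        obtain ⟨k, y, hk, h0, hset, hbk, hhy, c, hy⟩ := hsome D' h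
        refine ⟨k, y, by omega, h0, hset, hbk, hhy, fun j => if j = i then false else c j, ?_⟩
        rw [rxor_succ, if_neg (by simp), rxor_congr (f' := fun j => D.getD j 0) (c' := c)
          (fun j hj => rfl) (fun j hj => by simp [Nat.ne_of_lt hj])]
        exact hy

theorem spanD_set {m : Nat} {D : List Int} (hB : Basis m D) {k : Nat} {y : Int}
    (hk : k < m) (h0 : D.getD k 0 = 0) :
    ∀ z, SpanD m (D.set k y) z ↔ (SpanD m D z ∨ SpanD m D (Int.xor z y)) := by
  intro z
  obtain ⟨hlen, _⟩ := hB
  have hkl : k < D.length := by omega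
  have hf : ∀ (c : Nat → Bool) (t : Nat),
      rxor (fun j => (D.set k y).getD j 0) c t =
        rxor (fun j => if j = k then y else D.getD j 0) c t := by
    intro c t
    exact rxor_congr (fun j hj => getD_set y j hkl) (fun j hj => rfl)
  constructor
  · rintro ⟨c, hc⟩
    rw [hf, rxor_update _ _ _ _ _ (by omega)] at hc
    by_cases hck : c k = true
    · rw [hck, ite_true_eq] at hc
      right
      refine ⟨fun j => if j = k then false else c j, ?_⟩
      have e : Int.xor (Int.xor z y)
            (rxor (fun j => D.getD j 0) (fun j => if j = k then false else c j) m)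
          = Int.xor z
            (Int.xor (rxor (fun j => D.getD j 0) (fun j => if j = k then false else c j) m) y) := by
        simp [ixor_assoc, ixor_left_comm, ixor_comm, ixor_cancel_left, ixor_self, ixor_zero, zero_ixor]
      intro i hi
      rw [e]
      exact hc i hi
    · simp only [Bool.not_eq_true] at hck
      rw [hck, ite_false_eq, ixor_zero] at hc
      left
      exact ⟨fun j => if j = k then false else c j, hc⟩
  · rintro (⟨c, hc⟩ | ⟨c, hc⟩)
    · refine ⟨fun j => if j = k then false else c j, ?_⟩
      rw [hf, rxor_update _ _ _ _ _ (by omega)]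
      rw [if_pos (rfl : k = k), ite_false_eq, ixor_zero]
      have heq : (fun j => if j = k then false else if j = k then false else c j)
          = (fun j => if j = k then false else c j) := by
        funext j; by_cases hj : j = k <;> simp [hj]
      rw [heq, ← rxor_drop_zero h0]
      exact hc
    · refine ⟨fun j => if j = k then true else c j, ?_⟩
      rw [hf, rxor_update _ _ _ _ _ (by omega)]
      rw [if_pos (rfl : k = k), ite_true_eq]
      have heq : (fun j => if j = k then false else if j = k then true else c j)
          = (fun j => if j = k then false else c j) := by
        funext j; by_cases hj : j = k <;> simp [hj]
      rw [heq, ← rxor_drop_zero h0]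
      intro i hi
      have h2 := hc i hi
      rw [← h2]
      congr 1
      simp [ixor_assoc, ixor_left_comm, ixor_comm, ixor_cancel_left, ixor_self, ixor_zero, zero_ixor]

theorem greedy_iff_indepS {m : Nat} : ∀ (R : List Int) (D : List Int), Basis m D →
    (greedyAbs m D R = true ↔ IndepS (SpanD m D) R) := by
  intro R
  induction R with
  | nil =>
    intro D hB
    simp [greedyAbs, IndepS]
  | cons x r ih =>
    intro D hB
    rw [greedyAbs]
    obtain ⟨hnone, hsome⟩ := add_spec m (le_refl m) D x hB
      (fun j hj1 hj2 => absurd hj1 (by omega))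
    cases hadd : pvA_add D x m with
    | none =>
      simp only [IndepS]
      constructor
      · intro h
        exact absurd h (by simp)
      · rintro ⟨h1, _⟩
        exact absurd (hnone hadd) h1
    | some D' =>
      obtain ⟨k, y, hk, h0, hset, hbk, hhy, c, hy⟩ := hsome D' hadd
      have hkm : k < m := by omega
      have hBD' : Basis m D' := by
        subst hset
        refine ⟨by rw [List.length_set]; exact hB.1, ?_⟩
        intro i him
        rw [getD_set y i (by rw [hB.1]; omega)]
        by_cases hik : i = k
        · subst hik
          rw [if_pos rfl]
          right
          exact ⟨hbk, hhy⟩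
        · rw [if_neg hik]
          exact hB.2 i him
      have hyx : ∀ w, SpanD m D (Int.xor w y) ↔ SpanD m D (Int.xor w x) := by
        intro w
        rw [hy]
        have e : Int.xor w (Int.xor x (rxor (fun j => D.getD j 0) c m))
            = Int.xor (Int.xor w x) (rxor (fun j => D.getD j 0) c m) := by
          simp [ixor_assoc, ixor_left_comm, ixor_comm, ixor_cancel_left, ixor_self, ixor_zero, zero_ixor]
        rw [e]
        exact spanD_xor_iff (rxor (fun j => D.getD j 0) c m) (Int.xor w x) ⟨c, rfl⟩
      have hspan : ∀ z, SpanD m D' z ↔ (SpanD m D z ∨ SpanD m D (Int.xor z x)) := by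
        intro z
        rw [hset, spanD_set hB hkm h0 z]
        exact or_congr Iff.rfl (hyx z)
      have hnotx : ¬ SpanD m D x := by
        have hny : ¬ SpanD m D y := not_span_profile hB hkm h0 hbk hhy
        intro hx
        apply hny
        rw [hy]
        exact (spanD_xor_iff (rxor (fun j => D.getD j 0) c m) x ⟨c, rfl⟩).mpr hx
      simp only [IndepS]
      rw [ih D' hBD', indepS_congr hspan r]
      exact ⟨fun h => ⟨hnotx, h⟩, fun h => h.2⟩

theorem span_snoc (m : Nat) (P : List Int) (x : Int) :
    ∀ z, SpanL m (P ++ [x]) z ↔ (SpanL m P z ∨ SpanL m P (Int.xor z x)) := by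
  intro z
  have hlen : (P ++ [x]).length = P.length + 1 := by simp
  have hfl : ∀ (c : Nat → Bool),
      rxor (fun j => (P ++ [x]).getD j 0) c P.length = rxor (fun j => P.getD j 0) c P.length :=
    fun c => rxor_congr (fun j hj => getD_append_left hj) (fun j hj => rfl)
  constructor
  · rintro ⟨c, hc⟩
    rw [hlen, rxor_succ, hfl, getD_concat_self] at hc
    by_cases hcn : c P.length
    · right
      refine ⟨c, ?_⟩
      intro i hi
      have := hc i hi
      rw [← this]
      congr 1
      rw [hcn]
      simp only [if_true]
      simp [ixor_assoc, ixor_left_comm, ixor_comm, ixor_cancel_left, ixor_self, ixor_zero, zero_ixor]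
    · left
      refine ⟨c, ?_⟩
      intro i hi
      have := hc i hi
      rw [← this]
      congr 1
      rw [if_neg hcn]
  · rintro (⟨c, hc⟩ | ⟨c, hc⟩)
    · refine ⟨fun j => if j = P.length then false else c j, ?_⟩
      rw [hlen, rxor_succ, hfl, getD_concat_self]
      simp only [if_pos rfl, if_neg (Bool.false_ne_true)]
      rw [rxor_congr (f' := fun j => P.getD j 0) (c' := c) (fun j hj => rfl)
        (fun j hj => by simp [Nat.ne_of_lt hj])]
      exact hc
    · refine ⟨fun j => if j = P.length then true else c j, ?_⟩
      rw [hlen, rxor_succ, hfl, getD_concat_self]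
      simp only [if_pos rfl, if_true]
      rw [rxor_congr (f' := fun j => P.getD j 0) (c' := c) (fun j hj => rfl)
        (fun j hj => by simp [Nat.ne_of_lt hj])]
      intro i hi
      have := hc i hi
      rw [← this]
      congr 1
      simp [ixor_assoc, ixor_left_comm, ixor_comm, ixor_cancel_left, ixor_self, ixor_zero, zero_ixor]

theorem indepS_spanL {m : Nat} : ∀ (R P : List Int),
    IndepS (SpanL m P) R ↔ ∀ j, j < R.length → ¬ SpanL m (P ++ R.take j) (R.getD j 0) := by
  intro R
  induction R with
  | nil =>
    intro P
    simp [IndepS]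
  | cons x r ih =>
    intro P
    simp only [IndepS]
    rw [indepS_congr (fun z => (span_snoc m P x z).symm) r, ih (P ++ [x])]
    constructor
    · rintro ⟨h1, h2⟩ j hj
      match j with
      | 0 => simpa using h1
      | j + 1 =>
        have h3 := h2 j (by simpa using hj)
        simpa [List.append_assoc] using h3
    · intro h
      refine ⟨by simpa using h 0 (by simp), fun j hj => ?_⟩
      have h3 := h (j + 1) (by simpa using hj)
      simpa [List.append_assoc] using h3

theorem spanL_nil (m : Nat) (z : Int) : SpanL m [] z ↔ LowZero m z := by
  constructor
  · rintro ⟨c, hc⟩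
    intro i hi
    have := hc i hi
    rwa [show rxor (fun j => ([] : List Int).getD j 0) c ([] : List Int).length = 0 from rfl,
      ixor_zero] at this
  · intro h
    refine ⟨fun _ => false, ?_⟩
    intro i hi
    rw [show rxor (fun j => ([] : List Int).getD j 0) (fun _ => false) ([] : List Int).length = 0
      from rfl, ixor_zero]
    exact h i hi

theorem spanD_replicate (m : Nat) (z : Int) : SpanD m (List.replicate m 0) z ↔ LowZero m z := by
  have hf : ∀ j, j < m → (List.replicate m (0 : Int)).getD j 0 = 0 := by
    intro j hj
    rw [getD_lt 0 (by simpa using hj), List.getElem_replicate]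
  constructor
  · rintro ⟨c, hc⟩
    intro i hi
    have := hc i hi
    rwa [rxor_zero_fun hf, ixor_zero] at this
  · intro h
    refine ⟨fun _ => false, ?_⟩
    intro i hi
    rw [rxor_zero_fun hf, ixor_zero]
    exact h i hi

theorem dep_iff_depM (m : Nat) (R : List Int) : Dep m R ↔ DepM m R := by
  constructor
  · rintro ⟨j, hj, c, hc⟩
    have hlen : (R.take j).length = j := by simp; omega
    rw [hlen] at hc
    refine ⟨fun i => if i = j then true else decide (i < j) && c i, ⟨j, hj, by simp⟩, ?_⟩
    rw [rxor_false_above (t := j + 1) _ (by omega) (fun i h1 h2 => by simp; omega), rxor_succ]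
    rw [if_pos (show (if j = j then true else decide (j < j) && c j) = true by simp)]
    rw [rxor_congr (f' := fun i => (R.take j).getD i 0) (c' := c)
      (fun i hi => (getD_take hi).symm) (fun i hi => by simp [Nat.ne_of_lt hi, hi])]
    intro i hi
    have h2 := hc i hi
    rw [← h2]
    congr 1
    simp [ixor_assoc, ixor_left_comm, ixor_comm, ixor_cancel_left, ixor_self, ixor_zero, zero_ixor]
  · rintro ⟨c, ⟨j0, hj0, hcj0⟩, hc⟩
    have aux : ∀ t, t ≤ R.length → (∃ j, j < t ∧ c j = true) →
        LowZero m (rxor (fun j => R.getD j 0) c t) →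
        ∃ j, j < R.length ∧ SpanL m (R.take j) (R.getD j 0) := by
      intro t
      induction t with
      | zero => rintro _ ⟨j, hj, _⟩; omega
      | succ t ih =>
        rintro hle ⟨j, hj, hcj⟩ hlow
        rw [rxor_succ] at hlow
        by_cases hct : c t
        · refine ⟨t, by omega, ?_⟩
          refine ⟨c, ?_⟩
          have hlen : (R.take t).length = t := by simp; omega
          rw [hlen, rxor_congr (f' := fun j => R.getD j 0) (c' := c)
            (fun i hi => getD_take hi) (fun i hi => rfl)]
          intro i hi
          have h2 := hlow i hi
          rw [hct] at h2
          simp only [if_true] at h2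
          rw [← h2]
          congr 1
          simp [ixor_assoc, ixor_left_comm, ixor_comm, ixor_cancel_left, ixor_self, ixor_zero, zero_ixor]
        · rw [if_neg hct] at hlow
          exact ih (by omega) ⟨j, by have : j ≠ t := fun h => hct (h ▸ hcj); omega, hcj⟩ hlow
    exact aux R.length (le_refl _) ⟨j0, hj0, hcj0⟩ hc

-- ---- the Gaussian loop ----
def GP1 (m b : Nat) (rows : List Int) (used : List Bool) : Prop :=
  ∀ k, k < rows.length → used.getD k false = false →
    ∀ j, b ≤ j → j < m → (rows.getD k 0).testBit j = false

def GP2 (m b : Nat) (rows : List Int) (used : List Bool) : Prop :=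
  ∀ k, k < rows.length → used.getD k false = true →
    ∃ jk, b ≤ jk ∧ jk < m ∧ (rows.getD k 0).testBit jk = true ∧
      ∀ k', k' < rows.length → k' ≠ k → (rows.getD k' 0).testBit jk = false

theorem bool_count_le (l : List Bool) : l.count true ≤ l.length := by
  induction l with
  | nil => simp
  | cons b t ih =>
    cases b <;> simp [List.count_cons] <;> omega

theorem bool_count_all : ∀ {used : List Bool}, used.count true = used.length →
    ∀ k, k < used.length → used.getD k false = true := by
  intro used
  induction used with
  | nil => intro _ k hk; simp at hk
  | cons bh t ih =>
    intro h k hk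
    cases bh
    · exfalso
      simp [List.count_cons] at h
      have := bool_count_le t
      omega
    · match k with
      | 0 => rfl
      | k + 1 =>
        simp [List.count_cons] at h
        exact ih h k (by simpa using hk)

theorem bool_unused_exists : ∀ {used : List Bool}, used.count true ≠ used.length →
    ∃ k, k < used.length ∧ used.getD k false = false := by
  intro used
  induction used with
  | nil => intro h; simp at h
  | cons bh t ih =>
    intro h
    cases bh
    · exact ⟨0, by simp, rfl⟩
    · simp [List.count_cons] at h
      obtain ⟨k, hk, hkf⟩ := ih (by omega)
      exact ⟨k + 1, by simpa using hk, by simpa using hkf⟩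

theorem find_none {bit : Nat} : ∀ (l : List (Int × Bool)) (j0 : Nat),
    pvB_find bit l j0 = none →
    ∀ k, k < l.length → (l.getD k (0, false)).2 = false →
      ((l.getD k (0, false)).1).testBit bit = false := by
  intro l
  induction l with
  | nil => intro _ _ k hk _; simp at hk
  | cons q rest ih =>
    rcases q with ⟨r, u⟩
    intro j0 hnone k hk hu
    rw [pvB_find] at hnone
    by_cases hcond : (!u && r.testBit bit) = true
    · rw [if_pos hcond] at hnone; exact absurd hnone (by simp)
    · rw [if_neg hcond] at hnone
      match k with
      | 0 =>
        simp only [List.getD_cons_zero] at hu ⊢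
        subst hu
        simpa using hcond
      | k + 1 =>
        simp only [List.getD_cons_succ] at hu ⊢
        exact ih (j0 + 1) hnone k (by simpa using hk) hu

theorem find_some {bit : Nat} : ∀ (l : List (Int × Bool)) (j0 : Nat) (p : Nat),
    pvB_find bit l j0 = some p →
    ∃ k, k < l.length ∧ p = j0 + k ∧ (l.getD k (0, false)).2 = false ∧
      ((l.getD k (0, false)).1).testBit bit = true := by
  intro l
  induction l with
  | nil => intro j0 p h; simp [pvB_find] at h
  | cons q rest ih =>
    rcases q with ⟨r, u⟩
    intro j0 p h
    rw [pvB_find] at h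
    by_cases hcond : (!u && r.testBit bit) = true
    · rw [if_pos hcond] at h
      have hc' : u = false ∧ r.testBit bit = true := by
        constructor
        · cases u
          · rfl
          · simp at hcond
        · cases hbit : r.testBit bit
          · rw [hbit] at hcond; simp at hcond
          · rfl
      refine ⟨0, by simp, by simpa using h.symm, by simpa using hc'.1, by simpa using hc'.2⟩
    · rw [if_neg hcond] at h
      obtain ⟨k, hk, hp, h1, h2⟩ := ih (j0 + 1) p h
      exact ⟨k + 1, by simpa using hk, by omega, by simpa using h1, by simpa using h2⟩

theorem elim_length (rows : List Int) (p : Nat) (pv : Int) (bit : Nat) :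
    (pvB_elim rows p pv bit).length = rows.length := by
  simp [pvB_elim]

theorem elim_getD {rows : List Int} {k : Nat} (hk : k < rows.length) (p : Nat) (pv : Int) (bit : Nat) :
    (pvB_elim rows p pv bit).getD k 0 =
      if k ≠ p ∧ (rows.getD k 0).testBit bit then Int.xor (rows.getD k 0) pv
      else rows.getD k 0 := by
  rw [getD_lt 0 (by rw [elim_length]; exact hk), getD_lt 0 hk]
  unfold pvB_elim
  rw [List.getElem_map, List.getElem_zipIdx]
  simp

theorem depM_elim {m : Nat} {rows : List Int} {p : Nat} {bit : Nat}
    (hp : p < rows.length) (hpbit : (rows.getD p 0).testBit bit = true) :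
    (DepM m (pvB_elim rows p (rows.getD p 0) bit) ↔ DepM m rows) := by
  have hrows' : ∀ (c : Nat → Bool),
      rxor (fun j => (pvB_elim rows p (rows.getD p 0) bit).getD j 0) c rows.length
        = rxor (fun j => if (decide (j ≠ p) && (rows.getD j 0).testBit bit) = true then
            Int.xor (rows.getD j 0) (rows.getD p 0) else rows.getD j 0) c rows.length := by
    intro c
    apply rxor_congr _ (fun j hj => rfl)
    intro j hj
    rw [elim_getD hj _ _ _]
    by_cases h1 : j = p
    · simp [h1]
    · by_cases h2 : (rows.getD j 0).testBit bit = true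
      · simp [h1, h2]
      · simp [h1, h2]
  have key : ∀ (c : Nat → Bool),
      rxor (fun j => rows.getD j 0) (fun j => xor (c j) (decide (j = p))) rows.length
        = Int.xor (rxor (fun j => rows.getD j 0) c rows.length) (rows.getD p 0) := by
    intro c
    rw [rxor_mask_xor, rxor_single _ p rows.length hp]
  have hwit : ∀ (c : Nat → Bool), (∃ j, j < rows.length ∧ c j = true) →
      parf (fun j => c j && (decide (j ≠ p) && (rows.getD j 0).testBit bit)) rows.length = true →
      ∃ j, j < rows.length ∧ (xor (c j) (decide (j = p))) = true := by
    rintro c ⟨j0, hj0, hcj0⟩ hpar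
    by_cases hcp : c p = true
    · by_contra hno
      push_neg at hno
      have hallf : ∀ j, j < rows.length →
          (c j && (decide (j ≠ p) && (rows.getD j 0).testBit bit)) = false := by
        intro j hj
        by_cases hjp : j = p
        · simp [hjp]
        · have h3 := hno j hj
          simp [hjp] at h3
          simp [h3]
      rw [parf_false hallf] at hpar
      exact absurd hpar (by simp)
    · simp only [Bool.not_eq_true] at hcp
      exact ⟨p, hp, by simp [hcp]⟩
  constructor
  · rintro ⟨c, hwit0, hlow⟩
    rw [elim_length] at hwit0 hlow
    rw [hrows' c, rxor_map] at hlow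
    by_cases hpar :
        parf (fun j => c j && (decide (j ≠ p) && (rows.getD j 0).testBit bit)) rows.length = true
    · rw [hpar, ite_true_eq] at hlow
      refine ⟨fun j => xor (c j) (decide (j = p)), hwit c hwit0 hpar, ?_⟩
      rw [key c]
      exact hlow
    · simp only [Bool.not_eq_true] at hpar
      rw [hpar, ite_false_eq, ixor_zero] at hlow
      exact ⟨c, hwit0, hlow⟩
  · rintro ⟨c, hwit0, hlow⟩
    by_cases hpar :
        parf (fun j => c j && (decide (j ≠ p) && (rows.getD j 0).testBit bit)) rows.length = true
    · refine ⟨fun j => xor (c j) (decide (j = p)), ?_, ?_⟩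
      · rw [elim_length]
        exact hwit c hwit0 hpar
      · rw [elim_length, hrows' _, rxor_map]
        have hpeq : (fun j => (xor (c j) (decide (j = p)))
              && (decide (j ≠ p) && (rows.getD j 0).testBit bit))
            = (fun j => c j && (decide (j ≠ p) && (rows.getD j 0).testBit bit)) := by
          funext j
          by_cases hjp : j = p <;> simp [hjp]
        rw [hpeq, hpar, ite_true_eq, key c]
        have e : Int.xor (Int.xor (rxor (fun j => rows.getD j 0) c rows.length)
              (rows.getD p 0)) (rows.getD p 0)
            = rxor (fun j => rows.getD j 0) c rows.length := by
          simp [ixor_assoc, ixor_left_comm, ixor_comm, ixor_cancel_left, ixor_self, ixor_zero, zero_ixor]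
        rw [e]
        exact hlow
    · refine ⟨c, ?_, ?_⟩
      · rw [elim_length]
        exact hwit0
      · simp only [Bool.not_eq_true] at hpar
        rw [elim_length, hrows' _, rxor_map, hpar, ite_false_eq, ixor_zero]
        exact hlow

theorem count_set_true {used : List Bool} {p : Nat} (hp : p < used.length)
    (h : used.getD p false = false) :
    (used.set p true).count true = used.count true + 1 := by
  induction used generalizing p with
  | nil => simp at hp
  | cons b t ih =>
    match p with
    | 0 =>
      simp only [List.getD_cons_zero] at h
      subst h
      simp [List.count_cons]
    | p + 1 =>
      simp only [List.getD_cons_succ] at h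
      rw [List.set_cons_succ]
      rw [List.count_cons, List.count_cons, ih (by simpa using hp) h]
      omega

theorem gauss_spec {m : Nat} : ∀ (b : Nat), b ≤ m → ∀ (rows : List Int) (used : List Bool) (rank : Nat),
    used.length = rows.length → rank = used.count true →
    GP1 m b rows used → GP2 m b rows used →
    (pvB_loop b rows used rank = rows.length ↔ ¬ DepM m rows) := by
  intro b
  induction b with
  | zero =>
    intro _ rows used rank hlen hrank h1 h2
    rw [pvB_loop]
    constructor
    · intro hr
      rintro ⟨c, ⟨j0, hj0, hcj0⟩, hlow⟩
      have hall : ∀ k, k < rows.length → used.getD k false = true := by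
        have hcnt : used.count true = used.length := by omega
        intro k hk
        exact bool_count_all hcnt k (by omega)
      obtain ⟨jk, _, hjkm, hbitk, hpriv⟩ := h2 j0 hj0 (hall j0 hj0)
      have ht := hlow jk hjkm
      rw [tb_rxor, parf_single (j0 := j0) hj0
        (by show (c j0 && (rows.getD j0 0).testBit jk) = true; rw [hcj0, hbitk]; rfl)
        (fun j hj hne => by
          show (c j && (rows.getD j 0).testBit jk) = false
          rw [hpriv j hj hne]
          simp)] at ht
      exact absurd ht (by simp)
    · intro hnodep
      by_contra hne
      have hcnt : used.count true ≠ used.length := by omega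
      obtain ⟨k, hk, hkf⟩ := bool_unused_exists hcnt
      apply hnodep
      refine ⟨fun j => decide (j = k), ⟨k, by omega, by simp⟩, ?_⟩
      rw [rxor_single _ k _ (by omega)]
      intro i hi
      exact h1 k (by omega) hkf i (Nat.zero_le i) hi
  | succ b ihb =>
    intro hb rows used rank hlen hrank h1 h2
    rw [pvB_loop]
    cases hfind : pvB_find b (rows.zip used) 0 with
    | none =>
      have h1' : GP1 m b rows used := by
        intro k hk hu j hbj hjm
        rcases Nat.eq_or_lt_of_le hbj with heq | hlt
        · have hfz := find_none _ 0 hfind k (by rw [List.length_zip]; omega)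
            (by rw [getD_zip hlen hk]; exact hu)
          rw [getD_zip hlen hk] at hfz
          exact heq ▸ hfz
        · exact h1 k hk hu j (by omega) hjm
      have h2' : GP2 m b rows used := by
        intro k hk hu
        obtain ⟨jk, hjk1, hjk2, hjk3, hjk4⟩ := h2 k hk hu
        exact ⟨jk, by omega, hjk2, hjk3, hjk4⟩
      exact ihb (by omega) rows used rank hlen hrank h1' h2'
    | some p =>
      obtain ⟨k0, hk0len, hp0, hupk, hbitpk⟩ := find_some _ 0 _ hfind
      rw [List.length_zip, hlen, Nat.min_self] at hk0len
      rw [getD_zip hlen (by omega)] at hupk hbitpk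
      have hplen : p < rows.length := by omega
      have hup : used.getD p false = false := by
        rw [show p = k0 by omega]
        exact hupk
      have hbitp : (rows.getD p 0).testBit b = true := by
        rw [show p = k0 by omega]
        exact hbitpk
      have hlen' : (used.set p true).length = (pvB_elim rows p (rows.getD p 0) b).length := by
        rw [List.length_set, elim_length]
        exact hlen
      have hrank' : rank + 1 = (used.set p true).count true := by
        rw [count_set_true (by omega) hup]
        omega
      have hgu : ∀ k, (used.set p true).getD k false
          = if k = p then true else used.getD k false :=
        fun k => getD_set' true false k (by omega)
      have h1' : GP1 m b (pvB_elim rows p (rows.getD p 0) b) (used.set p true) := by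
        intro k hk hu j hbj hjm
        rw [elim_length] at hk
        rw [hgu k] at hu
        by_cases hkp : k = p
        · rw [if_pos hkp] at hu
          simp at hu
        · rw [if_neg hkp] at hu
          rw [elim_getD hk _ _ _]
          by_cases hcase : k ≠ p ∧ (rows.getD k 0).testBit b = true
          · rw [if_pos hcase, tb_xor]
            rcases Nat.eq_or_lt_of_le hbj with heq | hlt
            · cases heq
              rw [hcase.2, hbitp]
              rfl
            · rw [h1 k hk hu j (by omega) hjm, h1 p hplen hup j (by omega) hjm]
              rfl
          · rw [if_neg hcase]
            rcases Nat.eq_or_lt_of_le hbj with heq | hlt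
            · have hnb : ¬ ((rows.getD k 0).testBit b = true) := fun ht => hcase ⟨hkp, ht⟩
              cases heq
              simpa using hnb
            · exact h1 k hk hu j (by omega) hjm
      have h2' : GP2 m b (pvB_elim rows p (rows.getD p 0) b) (used.set p true) := by
        intro k hk hu
        rw [elim_length] at hk
        rw [hgu k] at hu
        by_cases hkp : k = p
        · subst hkp
          refine ⟨b, le_refl b, by omega, ?_, ?_⟩
          · rw [elim_getD hk _ _ _, if_neg (fun hcon => hcon.1 rfl)]
            exact hbitp
          · intro k' hk' hne
            rw [elim_length] at hk'
            rw [elim_getD hk' _ _ _]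
            by_cases hcase : k' ≠ k ∧ (rows.getD k' 0).testBit b = true
            · rw [if_pos hcase, tb_xor, hcase.2, hbitp]
              rfl
            · rw [if_neg hcase]
              have hnb : ¬ ((rows.getD k' 0).testBit b = true) := fun ht => hcase ⟨hne, ht⟩
              simpa using hnb
        · rw [if_neg hkp] at hu
          obtain ⟨jk, hjk1, hjk2, hjk3, hjk4⟩ := h2 k hk hu
          refine ⟨jk, by omega, hjk2, ?_, ?_⟩
          · rw [elim_getD hk _ _ _]
            by_cases hcase : k ≠ p ∧ (rows.getD k 0).testBit b = true
            · rw [if_pos hcase, tb_xor, hjk3, hjk4 p hplen (fun he => hkp he.symm)]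
              rfl
            · rw [if_neg hcase]
              exact hjk3
          · intro k' hk' hne
            rw [elim_length] at hk'
            rw [elim_getD hk' _ _ _]
            by_cases hcase : k' ≠ p ∧ (rows.getD k' 0).testBit b = true
            · rw [if_pos hcase, tb_xor, hjk4 k' hk' hne, hjk4 p hplen (fun he => hkp he.symm)]
              rfl
            · rw [if_neg hcase]
              exact hjk4 k' hk' hne
      have hmain := ihb (by omega) (pvB_elim rows p (rows.getD p 0) b) (used.set p true)
        (rank + 1) hlen' hrank' h1' h2'
      rw [elim_length] at hmain
      rw [hmain]
      exact not_congr (depM_elim hplen hbitp)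

-- ---- putting the two sides together ----
theorem pvA_main_eq_greedy (m : Nat) (flags : List Bool) :
    ∀ (l : List (Int × Nat)) (D : List Int),
      pvA_main m flags l D =
        greedyAbs m D (l.filterMap (fun p => if flags.getD p.2 false then none else some p.1)) := by
  intro l
  induction l with
  | nil => intro D; rfl
  | cons q rest ih =>
    rcases q with ⟨a, i⟩
    intro D
    rw [pvA_main]
    by_cases hf : flags.getD i false
    · rw [if_pos hf]
      simp only [List.filterMap_cons, hf, if_true]
      exact ih D
    · rw [if_neg hf]
      simp only [List.filterMap_cons, hf]
      simp only [Bool.false_eq_true, if_false]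
      rw [greedyAbs]
      cases hadd : pvA_add D a m with
      | none => rfl
      | some D' => exact ih D'

theorem core (m : Nat) (R : List Int) :
    greedyAbs m (List.replicate m 0) R =
      (pvB_loop m R (List.replicate R.length false) 0 == R.length) := by
  have hB0 : Basis m (List.replicate m 0) :=
    ⟨by simp, fun i hi => Or.inl (by rw [getD_replicate']; simp [hi])⟩
  have hchain1 := greedy_iff_indepS R (List.replicate m 0) hB0
  have hchain2 := indepS_congr (S := SpanD m (List.replicate m 0)) (T := SpanL m [])
    (fun z => by rw [spanD_replicate m z, spanL_nil m z]) R
  have hchain3 := indepS_spanL (m := m) R []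
  have hgauss := gauss_spec m (le_refl m) R (List.replicate R.length false) 0
    (by simp) (by rw [List.count_replicate]; simp)
    (fun k hk hu j hj1 hj2 => absurd hj1 (by omega))
    (fun k hk hu => by rw [getD_replicate', ite_self] at hu; exact Bool.noConfusion hu)
  rw [Bool.eq_iff_iff, beq_iff_eq, hchain1, hchain2, hchain3, hgauss, ← dep_iff_depM]
  constructor
  · rintro h ⟨j, hj, hs⟩
    exact h j hj (by simpa using hs)
  · intro h j hj hs
    exact h ⟨j, hj, by simpa using hs⟩

-- ===== VERDICT (by name: the statement is the Claim_ definition above) =====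
theorem remaining_is_basis_py_spec : Claim_equal_remaining_is_basis_py := by
  intro A R _ _
  unfold Spec_remaining_is_basis_py remaining_is_basis_py remaining_is_basis_py_alt
  by_cases hA : A = []
  · simp [hA]
  · simp only [hA, if_false]
    rw [pvA_main_eq_greedy]
    exact core _ _
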